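-- pv_equiv track=rewrite | github.com/VladKochetov007/FPGAEnv | src/rlvr_envs/envs/fpga/tasks.py | _ll_traverse_4
-- ===== SOURCE A (Python) =====
-- from typing import Dict, List, Tuple
--
-- def _ll_traverse_4(packed: int) -> int:
--     """4-node linked list: each node is (value[3:0], next[5:4]).
--     Start at node 0, follow `steps` pointers. Output value at final node."""
--     nodes: List[Tuple[int, int]] = []
--     for i in range(4):
--         word = (packed >> (6 * i)) & 0x3F
--         value = word & 0xF
--         nxt = (word >> 4) & 0x3
--         nodes.append((value, nxt))
--     steps = (packed >> 24) & 0x3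
--     idx = 0
--     for _ in range(steps):
--         idx = nodes[idx][1]
--     return nodes[idx][0]
-- ===== SOURCE B (Python) =====
-- def _ll_traverse_4(packed: int) -> int:
--     """Exponentiation-by-squaring of the successor map: build the next-map t
--     and its self-composition t2 = t o t once, then apply t and/or t2 according
--     to the two bits of `steps` -- no sequential pointer-chasing loop."""
--     t = [(packed >> (6 * i + 4)) & 0x3 for i in range(4)]
--     t2 = [t[t[i]] for i in range(4)]
--     steps = (packed >> 24) & 0x3
--     idx = 0
--     if steps & 1:
--         idx = t[idx]
--     if steps & 2:
--         idx = t2[idx]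
--     return (packed >> (6 * idx)) & 0xF
-- ===== Notes on version B (the rewrite author's own statement) =====
-- stated objective: alternative
-- what changed: B replaces A's sequential pointer-chasing loop (build node table, then follow next-pointers steps times) with exponentiation-by-squaring of the successor map: it builds the next-map t and its composition t2 = t∘t, then applies t and/or t2 once according to the binary decomposition of steps, so no traversal loop remains.
import Mathlib
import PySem

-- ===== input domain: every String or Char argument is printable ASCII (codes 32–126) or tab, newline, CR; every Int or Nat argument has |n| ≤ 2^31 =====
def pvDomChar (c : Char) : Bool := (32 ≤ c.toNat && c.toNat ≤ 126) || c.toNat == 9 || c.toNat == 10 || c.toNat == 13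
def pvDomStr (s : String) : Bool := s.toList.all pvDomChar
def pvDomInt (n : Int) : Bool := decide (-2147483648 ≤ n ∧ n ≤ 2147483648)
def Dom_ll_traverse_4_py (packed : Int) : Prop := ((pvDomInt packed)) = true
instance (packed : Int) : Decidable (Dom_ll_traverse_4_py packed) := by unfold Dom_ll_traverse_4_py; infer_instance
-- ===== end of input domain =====

-- B replaces A's build-table-then-chase-pointers loop with exponentiation-by-squaring
-- of the successor map (apply t / t∘t per bit of steps); objective: alternative.


-- ===== PORT A =====
-- nodes[idx] is ported with pyGet?/getD; exact because idx is always
-- 0 ≤ idx < 4 (idx starts at 0, each next-field is masked with 0x3), so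
-- Python's indexing never raises and the default (0,0) is never taken.
def ll_traverse_4_py (packed : Int) : Int :=
  let nodes : List (Int × Int) :=
    (PySem.List.pyRange 0 4 1).foldl (fun ns i =>
      let word := PySem.Int.band (packed >>> (6 * i).toNat) 63
      let value := PySem.Int.band word 15
      let nxt := PySem.Int.band (word >>> (4:Nat)) 3
      ns ++ [(value, nxt)]) []
  let steps := PySem.Int.band (packed >>> (24:Nat)) 3
  let idx := (PySem.List.pyRange 0 steps 1).foldl
    (fun idx _ => ((PySem.List.pyGet? nodes idx).getD (0, 0)).2) 0
  ((PySem.List.pyGet? nodes idx).getD (0, 0)).1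

-- ===== PORT B =====
-- t[...] indexing ported with pyGet?/getD; exact because every entry of t is
-- masked with 0x3, so indices stay in [0,4) and Python never raises there.
def ll_traverse_4_py_alt (packed : Int) : Int :=
  let t : List Int := (PySem.List.pyRange 0 4 1).map
    (fun i => PySem.Int.band (packed >>> (6 * i + 4).toNat) 3)
  let t2 : List Int := (PySem.List.pyRange 0 4 1).map
    (fun i => (PySem.List.pyGet? t ((PySem.List.pyGet? t i).getD 0)).getD 0)
  let steps := PySem.Int.band (packed >>> (24:Nat)) 3
  let idx : Int := 0
  let idx := if PySem.Int.band steps 1 ≠ 0 then (PySem.List.pyGet? t idx).getD 0 else idx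
  let idx := if PySem.Int.band steps 2 ≠ 0 then (PySem.List.pyGet? t2 idx).getD 0 else idx
  PySem.Int.band (packed >>> (6 * idx).toNat) 15

-- ===== PRECONDITION & SPEC =====
def Spec_ll_traverse_4_py (packed : Int) (out : Int) : Prop := out = ll_traverse_4_py_alt packed
instance (packed : Int) (out : Int) : Decidable (Spec_ll_traverse_4_py packed out) := by unfold Spec_ll_traverse_4_py; infer_instance

-- ===== CLAIM (what is proved, stated in full; the proofs are below) =====
def Claim_equal_ll_traverse_4_py : Prop := ∀ (packed : Int), Dom_ll_traverse_4_py packed → Spec_ll_traverse_4_py packed (ll_traverse_4_py packed)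

-- ===== LEMMAS AND PROOFS =====

-- Python's x & (2^k - 1) is x mod 2^k, also on negatives (specialised masks).
theorem band63 (x : Int) : PySem.Int.band x 63 = x % 64 := by
  unfold PySem.Int.band
  split_ifs with h1 h2 h3 <;> try omega
  · rw [show ((63:Int).toNat) = 2^6-1 from rfl, Nat.and_two_pow_sub_one_eq_mod]
    omega
  · rw [show ((63:Int).toNat) = 2^6-1 from rfl, Nat.and_comm, Nat.and_two_pow_sub_one_eq_mod]
    omega

theorem band15 (x : Int) : PySem.Int.band x 15 = x % 16 := by
  unfold PySem.Int.band
  split_ifs with h1 h2 h3 <;> try omega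
  · rw [show ((15:Int).toNat) = 2^4-1 from rfl, Nat.and_two_pow_sub_one_eq_mod]
    omega
  · rw [show ((15:Int).toNat) = 2^4-1 from rfl, Nat.and_comm, Nat.and_two_pow_sub_one_eq_mod]
    omega

theorem band3 (x : Int) : PySem.Int.band x 3 = x % 4 := by
  unfold PySem.Int.band
  split_ifs with h1 h2 h3 <;> try omega
  · rw [show ((3:Int).toNat) = 2^2-1 from rfl, Nat.and_two_pow_sub_one_eq_mod]
    omega
  · rw [show ((3:Int).toNat) = 2^2-1 from rfl, Nat.and_comm, Nat.and_two_pow_sub_one_eq_mod]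
    omega

-- Int-valued shift amounts (as simp leaves them) as division by 2^k.
theorem shr0 (y : Int) : y >>> (0:Int) = y := by
  rw [show (0:Int) = ((0:Nat):Int) by norm_num, Int.shiftRight_natCast_right,
    Int.shiftRight_eq_div_pow]; norm_num

theorem shr6 (y : Int) : y >>> (6:Int) = y / 64 := by
  rw [show (6:Int) = ((6:Nat):Int) by norm_num, Int.shiftRight_natCast_right,
    Int.shiftRight_eq_div_pow]; norm_num

theorem shr12 (y : Int) : y >>> (12:Int) = y / 4096 := by
  rw [show (12:Int) = ((12:Nat):Int) by norm_num, Int.shiftRight_natCast_right,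
    Int.shiftRight_eq_div_pow]; norm_num

theorem shr18 (y : Int) : y >>> (18:Int) = y / 262144 := by
  rw [show (18:Int) = ((18:Nat):Int) by norm_num, Int.shiftRight_natCast_right,
    Int.shiftRight_eq_div_pow]; norm_num

-- B's next-field read, as a named function.
def nxtF (packed i : Int) : Int := PySem.Int.band (packed >>> (6 * i + 4).toNat) 3

theorem nxtF_bounds (packed i : Int) : 0 ≤ nxtF packed i ∧ nxtF packed i < 4 := by
  unfold nxtF; rw [band3]; omega

-- A's node table, as built by its first loop.
def nodesOf (packed : Int) : List (Int × Int) :=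
  (PySem.List.pyRange 0 4 1).foldl (fun ns i =>
    let word := PySem.Int.band (packed >>> (6 * i).toNat) 63
    let value := PySem.Int.band word 15
    let nxt := PySem.Int.band (word >>> (4:Nat)) 3
    ns ++ [(value, nxt)]) []

-- A's table lookups agree with direct bit-field reads (idx in range).
theorem lookup_val (packed i : Int) (h0 : 0 ≤ i) (h4 : i < 4) :
    ((PySem.List.pyGet? (nodesOf packed) i).getD (0, 0)).1
      = PySem.Int.band (packed >>> (6 * i).toNat) 15 := by
  interval_cases i <;>
    simp only [nodesOf, show PySem.List.pyRange 0 4 1 = [0,1,2,3] from rfl,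
      List.foldl, List.nil_append, List.cons_append] <;>
    simp [PySem.List.pyGet?, PySem.List.pyIdx?] <;>
    simp only [band63, band15, shr0, shr6, shr12, shr18, Int.shiftRight_eq_div_pow] <;>
    norm_num

theorem lookup_nxt (packed i : Int) (h0 : 0 ≤ i) (h4 : i < 4) :
    ((PySem.List.pyGet? (nodesOf packed) i).getD (0, 0)).2 = nxtF packed i := by
  unfold nxtF
  interval_cases i <;>
    simp only [nodesOf, show PySem.List.pyRange 0 4 1 = [0,1,2,3] from rfl,
      List.foldl, List.nil_append, List.cons_append] <;>
    simp [PySem.List.pyGet?, PySem.List.pyIdx?] <;>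
    simp only [band63, band3, shr0, shr6, shr12, shr18, Int.shiftRight_eq_div_pow] <;>
    norm_num <;> omega

-- Lookup in a table built by mapping g over range(4) is g itself (index in range).
theorem map_range4_lookup (g : Int → Int) (i : Int) (h0 : 0 ≤ i) (h4 : i < 4) :
    (PySem.List.pyGet? ((PySem.List.pyRange 0 4 1).map g) i).getD 0 = g i := by
  show PySem.List.pyGetD ((PySem.List.pyRange 0 4 1).map g) i 0 = g i
  interval_cases i
  · exact_mod_cast PySem.List.pyGetD_map_pyRange g 4 0 0 (by norm_num)
  · exact_mod_cast PySem.List.pyGetD_map_pyRange g 4 1 0 (by norm_num)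
  · exact_mod_cast PySem.List.pyGetD_map_pyRange g 4 2 0 (by norm_num)
  · exact_mod_cast PySem.List.pyGetD_map_pyRange g 4 3 0 (by norm_num)

-- B's table t, and its lookups.
def tOf (packed : Int) : List Int :=
  (PySem.List.pyRange 0 4 1).map (fun i => PySem.Int.band (packed >>> (6 * i + 4).toNat) 3)

theorem tOf_lookup (packed i : Int) (h0 : 0 ≤ i) (h4 : i < 4) :
    (PySem.List.pyGet? (tOf packed) i).getD 0 = nxtF packed i := by
  unfold tOf nxtF
  have h := map_range4_lookup (fun i => PySem.Int.band (packed >>> (((6 * i + 4).toNat : Nat) : Int)) 3) i h0 h4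
  have h2 : packed >>> ((6 * i + 4).toNat) = packed >>> (((6 * i + 4).toNat : Nat) : Int) :=
    (Int.shiftRight_natCast_right _ _).symm
  rw [h2]
  simpa [Int.shiftRight_natCast_right] using h

-- B's squared table t2: its lookup is nxtF applied twice.
def t2Of (packed : Int) : List Int :=
  (PySem.List.pyRange 0 4 1).map
    (fun i => (PySem.List.pyGet? (tOf packed) ((PySem.List.pyGet? (tOf packed) i).getD 0)).getD 0)

theorem t2Of_lookup (packed i : Int) (h0 : 0 ≤ i) (h4 : i < 4) :
    (PySem.List.pyGet? (t2Of packed) i).getD 0 = nxtF packed (nxtF packed i) := by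
  have hb := nxtF_bounds packed i
  unfold t2Of
  rw [map_range4_lookup _ i h0 h4, tOf_lookup packed i h0 h4,
    tOf_lookup packed _ hb.1 hb.2]

-- ===== VERDICT (by name: the statement is the Claim_ definition above) =====
theorem ll_traverse_4_py_spec : Claim_equal_ll_traverse_4_py := by
  intro packed _
  unfold Spec_ll_traverse_4_py
  have hA : ll_traverse_4_py packed =
      ((PySem.List.pyGet? (nodesOf packed)
        ((PySem.List.pyRange 0 (PySem.Int.band (packed >>> (24:Nat)) 3) 1).foldl
          (fun idx _ => ((PySem.List.pyGet? (nodesOf packed) idx).getD (0, 0)).2) 0)).getD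
        (0, 0)).1 := rfl
  have hB : ll_traverse_4_py_alt packed =
      (let steps := PySem.Int.band (packed >>> (24:Nat)) 3
       let idx : Int := 0
       let idx := if PySem.Int.band steps 1 ≠ 0 then (PySem.List.pyGet? (tOf packed) idx).getD 0 else idx
       let idx := if PySem.Int.band steps 2 ≠ 0 then (PySem.List.pyGet? (t2Of packed) idx).getD 0 else idx
       PySem.Int.band (packed >>> (6 * idx).toNat) 15) := rfl
  rw [hA, hB]
  set s := PySem.Int.band (packed >>> (24:Nat)) 3 with hs
  have hsb : 0 ≤ s ∧ s < 4 := by rw [hs, band3]; omega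
  set f : Int → Int := nxtF packed with hf
  have b1 := nxtF_bounds packed 0
  have b2 := nxtF_bounds packed (f 0)
  have step : ∀ i : Int, 0 ≤ i → i < 4 →
      ((PySem.List.pyGet? (nodesOf packed) i).getD (0, 0)).2 = f i :=
    fun i h0 h4 => lookup_nxt packed i h0 h4
  have hcases : s = 0 ∨ s = 1 ∨ s = 2 ∨ s = 3 := by omega
  rcases hcases with h | h | h | h <;> rw [h] <;>
    simp only [show PySem.List.pyRange 0 0 1 = [] from rfl,
      show PySem.List.pyRange 0 1 1 = [0] from rfl,
      show PySem.List.pyRange 0 2 1 = [0,1] from rfl,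
      show PySem.List.pyRange 0 3 1 = [0,1,2] from rfl, List.foldl,
      show PySem.Int.band 0 1 = 0 from rfl, show PySem.Int.band 0 2 = 0 from rfl,
      show PySem.Int.band 1 1 = 1 from rfl, show PySem.Int.band 1 2 = 0 from rfl,
      show PySem.Int.band 2 1 = 0 from rfl, show PySem.Int.band 2 2 = 2 from rfl,
      show PySem.Int.band 3 1 = 1 from rfl, show PySem.Int.band 3 2 = 2 from rfl,
      ne_eq]
  · -- steps = 0
    norm_num
    simpa using lookup_val packed 0 (by omega) (by omega)
  · -- steps = 1: one application of t
    norm_num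
    rw [step 0 (by omega) (by omega), tOf_lookup packed 0 (by omega) (by omega)]
    exact lookup_val packed (f 0) b1.1 b1.2
  · -- steps = 2: one application of t2
    norm_num
    rw [step 0 (by omega) (by omega), step (f 0) b1.1 b1.2,
      t2Of_lookup packed 0 (by omega) (by omega)]
    exact lookup_val packed (f (f 0)) b2.1 b2.2
  · -- steps = 3: t then t2
    norm_num
    rw [step 0 (by omega) (by omega), step (f 0) b1.1 b1.2,
      step (f (f 0)) b2.1 b2.2, tOf_lookup packed 0 (by omega) (by omega),
      t2Of_lookup packed (f 0) b1.1 b1.2]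
    exact lookup_val packed (f (f (f 0))) (nxtF_bounds packed (f (f 0))).1
      (nxtF_bounds packed (f (f 0))).2
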